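-- pv_equiv track=rewrite | github.com/JordanFitz/aoc2023 | 03/part2.py | get_adj_nums
-- ===== SOURCE A (Python) =====
-- def get_num(line, x, y):
--     res = {}
--     r = ""
--     s = x
--     while x >= 0 and line[x].isnumeric():
--         res[str(x)+","+str(y)] = line[x]
--         r = line[x] + r
--         x -= 1
--     x = s+1
--     while x < len(line) and line[x].isnumeric():
--         res[str(x)+","+str(y)] = line[x]
--         r += line[x]
--         x += 1
--     return res,r
--
-- def overlap(a, b):
--     for k in a:
--         if k in b: return True
--     for k in b:
--         if k in a: return True
--     return False
--
-- def get_adj_nums(mat, x, y):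
--     nums = []
--
--     offsets = [-1,0,1]
--
--     for oy in offsets:
--         yy = y + oy
--         if yy < 0 or yy >= len(mat): continue
--         for ox in offsets:
--             xx = x + ox
--
--             if ox == 0 and oy == 0: continue
--             if xx < 0 or xx >= len(mat[yy]): continue
--
--             val = mat[yy][xx]
--             if val.isnumeric():
--                 num = get_num(mat[yy], xx, yy)
--                 overlaps = False
--                 for existing in nums:
--                     if not overlaps:
--                         overlaps = overlap(existing[0], num[0])
--                     else: break
--                 if not overlaps:
--                     nums.append(num)
--
--     res = list(map(lambda n: int(n[1]), nums))
--     return res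
-- ===== SOURCE B (Python) =====
-- def get_adj_nums(mat, x, y):
--     res = []
--     seen = set()
--     for oy in (-1, 0, 1):
--         yy = y + oy
--         if yy < 0 or yy >= len(mat):
--             continue
--         line = mat[yy]
--         for ox in (-1, 0, 1):
--             if ox == 0 and oy == 0:
--                 continue
--             xx = x + ox
--             if xx < 0 or xx >= len(line):
--                 continue
--             if not line[xx].isnumeric():
--                 continue
--             sx = xx
--             while sx > 0 and line[sx - 1].isnumeric():
--                 sx -= 1
--             if (sx, yy) in seen:
--                 continue
--             seen.add((sx, yy))
--             ex = sx
--             while ex < len(line) and line[ex].isnumeric():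
--                 ex += 1
--             res.append(int(line[sx:ex]))
--     return res
-- ===== Notes on version B (the rewrite author's own statement) =====
-- stated objective: alternative
-- what changed: B drops A's list of coordinate-keyed dicts and the pairwise overlap() scan over all previously found numbers, and instead dedupes by a set of canonical (run-start, row) keys: for each numeric neighbour it walks left to the start of its digit run, skips the key if already seen, otherwise reads the run once and appends its int value.
import Mathlib
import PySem

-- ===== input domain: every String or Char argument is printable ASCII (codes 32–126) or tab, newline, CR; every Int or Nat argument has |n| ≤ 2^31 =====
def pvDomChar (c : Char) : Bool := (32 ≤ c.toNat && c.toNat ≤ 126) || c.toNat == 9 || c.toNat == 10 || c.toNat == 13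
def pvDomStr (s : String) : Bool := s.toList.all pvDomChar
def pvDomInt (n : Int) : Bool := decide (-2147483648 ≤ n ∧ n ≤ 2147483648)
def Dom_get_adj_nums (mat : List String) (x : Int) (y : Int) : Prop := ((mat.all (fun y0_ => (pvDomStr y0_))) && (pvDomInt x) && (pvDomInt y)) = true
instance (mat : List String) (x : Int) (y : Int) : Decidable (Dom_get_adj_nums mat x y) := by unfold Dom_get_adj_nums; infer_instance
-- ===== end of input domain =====

-- B replaces A's list of coordinate-dictionaries and pairwise `overlap` scans by a set of
-- canonical (run-start, row) keys: same first-discovery order and values, different bookkeeping.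
-- (`.isnumeric()` is ported as the per-char isdigit, exact on the ASCII domain.)

-- ===== PORT A =====
-- the dict key  str(x) + "," + str(y)
def pvKeyA (x y : Int) : List Char := PySem.Int.toChars x ++ ',' :: PySem.Int.toChars y

-- first while loop of get_num (walks left); fuel (x+1).toNat bounds its iterations exactly.
-- dict values are the single characters ln[x] (Python stores them as 1-char strings).
def get_num_left (ln : List Char) (y : Int) :
    Nat → Int → PySem.Dict (List Char) Char → List Char → PySem.Dict (List Char) Char × List Char
  | 0, _, res, r => (res, r)
  | fuel + 1, x, res, r =>
    if 0 ≤ x ∧ PySem.Chars.isdigit (PySem.List.pyGetD ln x ' ') = true then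
      get_num_left ln y fuel (x - 1)
        (res.insert (pvKeyA x y) (PySem.List.pyGetD ln x ' '))
        (PySem.List.pyGetD ln x ' ' :: r)
    else (res, r)

-- second while loop of get_num (walks right); fuel (len-x).toNat bounds its iterations exactly
def get_num_right (ln : List Char) (y : Int) :
    Nat → Int → PySem.Dict (List Char) Char → List Char → PySem.Dict (List Char) Char × List Char
  | 0, _, res, r => (res, r)
  | fuel + 1, x, res, r =>
    if x < (ln.length : Int) ∧ PySem.Chars.isdigit (PySem.List.pyGetD ln x ' ') = true then
      get_num_right ln y fuel (x + 1)
        (res.insert (pvKeyA x y) (PySem.List.pyGetD ln x ' '))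
        (r ++ [PySem.List.pyGetD ln x ' '])
    else (res, r)

def get_num (ln : List Char) (x y : Int) : PySem.Dict (List Char) Char × List Char :=
  let lr := get_num_left ln y (x + 1).toNat x PySem.Dict.empty []
  get_num_right ln y ((ln.length : Int) - (x + 1)).toNat (x + 1) lr.1 lr.2

-- the two early-return `for k in …` loops, as short-circuit any
def overlap (a b : PySem.Dict (List Char) Char) : Bool :=
  a.keys.any (fun k => b.contains k) || b.keys.any (fun k => a.contains k)

def get_adj_nums (mat : List String) (x : Int) (y : Int) : List Int :=
  let offsets : List Int := [-1, 0, 1]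
  let nums := offsets.foldl (fun nums oy =>
    let yy := y + oy
    if yy < 0 ∨ (mat.length : Int) ≤ yy then nums
    else
      let ln := (PySem.List.pyGetD mat yy "").toList   -- mat[yy] (in range here)
      offsets.foldl (fun nums ox =>
        if ox = 0 ∧ oy = 0 then nums
        else
          let xx := x + ox
          if xx < 0 ∨ (ln.length : Int) ≤ xx then nums
          else
            let val := PySem.List.pyGetD ln xx ' '
            if PySem.Chars.isdigit val = true then
              let num := get_num ln xx yy
              let overlaps := nums.foldl
                (fun ov existing => if !ov then overlap existing.1 num.1 else ov) false
              if overlaps then nums else nums ++ [num]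
            else nums) nums) []
  nums.map (fun n => (PySem.Int.ofChars? n.2).getD 0)

-- ===== PORT B =====
-- while sx > 0 and ln[sx-1].isnumeric(): sx -= 1      (fuel sx.toNat bounds the iterations)
def pvScanLeft (ln : List Char) : Nat → Int → Int
  | 0, sx => sx
  | fuel + 1, sx =>
    if 0 < sx ∧ PySem.Chars.isdigit (PySem.List.pyGetD ln (sx - 1) ' ') = true then
      pvScanLeft ln fuel (sx - 1)
    else sx

-- while ex < len(ln) and ln[ex].isnumeric(): ex += 1
def pvScanRight (ln : List Char) : Nat → Int → Int
  | 0, ex => ex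
  | fuel + 1, ex =>
    if ex < (ln.length : Int) ∧ PySem.Chars.isdigit (PySem.List.pyGetD ln ex ' ') = true then
      pvScanRight ln fuel (ex + 1)
    else ex

def get_adj_nums_alt (mat : List String) (x : Int) (y : Int) : List Int :=
  let st := ([-1, 0, 1] : List Int).foldl (fun st oy =>
    let yy := y + oy
    if yy < 0 ∨ (mat.length : Int) ≤ yy then st
    else
      let ln := (PySem.List.pyGetD mat yy "").toList   -- mat[yy]
      ([-1, 0, 1] : List Int).foldl (fun st ox =>
        if ox = 0 ∧ oy = 0 then st
        else
          let xx := x + ox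
          if xx < 0 ∨ (ln.length : Int) ≤ xx then st
          else if PySem.Chars.isdigit (PySem.List.pyGetD ln xx ' ') = true then
            let sx := pvScanLeft ln xx.toNat xx
            if PySem.Set.contains st.1 (sx, yy) then st
            else
              let ex := pvScanRight ln (ln.length - sx.toNat) sx
              (PySem.Set.add st.1 (sx, yy),
               st.2 ++ [(PySem.Int.ofChars? (PySem.List.slice ln (some sx) (some ex))).getD 0])
          else st) st) ((PySem.Set.empty : PySem.Set (Int × Int)), ([] : List Int))
  st.2

-- ===== PRECONDITION & SPEC =====
def Spec_get_adj_nums (mat : List String) (x : Int) (y : Int) (out : List Int) : Prop := out = get_adj_nums_alt mat x y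
instance (mat : List String) (x : Int) (y : Int) (out : List Int) : Decidable (Spec_get_adj_nums mat x y out) := by unfold Spec_get_adj_nums; infer_instance

-- ===== CLAIM (what is proved, stated in full; the proofs are below) =====
def Claim_equal_get_adj_nums : Prop := ∀ (mat : List String) (x : Int) (y : Int), Dom_get_adj_nums mat x y → Spec_get_adj_nums mat x y (get_adj_nums mat x y)

-- ===== LEMMAS AND PROOFS =====

-- generic fold/Forall₂ helpers ------------------------------------------------

theorem pvFoldlRel {α γ δ : Type} (R : γ → δ → Prop) (f : γ → α → γ) (g : δ → α → δ) :
    ∀ (l : List α), (∀ c d a, a ∈ l → R c d → R (f c a) (g d a)) →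
      ∀ c d, R c d → R (l.foldl f c) (l.foldl g d)
  | [], _, _, _, h => h
  | a :: l, hstep, c, d, h => by
    simp only [List.foldl_cons]
    exact pvFoldlRel R f g l (fun c d a' ha' hr => hstep c d a' (List.mem_cons_of_mem _ ha') hr)
      _ _ (hstep c d a (List.mem_cons_self ..) h)

theorem pvForall₂_exists_right {α β : Type} {R : α → β → Prop} {l1 : List α} {l2 : List β}
    (h : List.Forall₂ R l1 l2) : ∀ b ∈ l2, ∃ a ∈ l1, R a b := by
  induction h with
  | nil => intro b hb; cases hb
  | cons hab _ ih =>
    intro b hb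
    rcases List.mem_cons.mp hb with rfl | hb'
    · exact ⟨_, List.mem_cons_self .., hab⟩
    · obtain ⟨a, ha, hr⟩ := ih b hb'
      exact ⟨a, List.mem_cons_of_mem _ ha, hr⟩

theorem pvForall₂_exists_left {α β : Type} {R : α → β → Prop} {l1 : List α} {l2 : List β}
    (h : List.Forall₂ R l1 l2) : ∀ a ∈ l1, ∃ b ∈ l2, R a b := by
  induction h with
  | nil => intro a ha; cases ha
  | cons hab _ ih =>
    intro a ha
    rcases List.mem_cons.mp ha with rfl | ha'
    · exact ⟨_, List.mem_cons_self .., hab⟩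
    · obtain ⟨b, hb, hr⟩ := ih a ha'
      exact ⟨b, List.mem_cons_of_mem _ hb, hr⟩

theorem pvForall₂_map_eq {α β γ : Type} {R : α → β → Prop} (f : α → γ) (g : β → γ)
    {l1 : List α} {l2 : List β} (h : List.Forall₂ R l1 l2)
    (hfg : ∀ a b, R a b → f a = g b) : l1.map f = l2.map g := by
  induction h with
  | nil => rfl
  | cons hab _ ih => simp only [List.map_cons, hfg _ _ hab, ih]

theorem pvForall₂_append_singleton {α β : Type} {R : α → β → Prop} {l1 : List α} {l2 : List β}
    (h : List.Forall₂ R l1 l2) {a : α} {b : β} (hab : R a b) :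
    List.Forall₂ R (l1 ++ [a]) (l2 ++ [b]) := by
  induction h with
  | nil => exact List.Forall₂.cons hab List.Forall₂.nil
  | cons hxy _ ih => exact List.Forall₂.cons hxy ih

theorem pvFoldlOr {β : Type} (p : β → Bool) :
    ∀ (l : List β) (b : Bool), l.foldl (fun ov e => if !ov then p e else ov) b = (b || l.any p)
  | [], b => by cases b <;> simp
  | e :: l, b => by
    cases b
    · simpa using pvFoldlOr p l (p e)
    · simpa using pvFoldlOr p l true

-- digit-at-a-position, with the bounds baked in ------------------------------

def digA (ln : List Char) (i : Int) : Bool :=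
  decide (0 ≤ i) && decide (i < (ln.length : Int)) && PySem.Chars.isdigit (PySem.List.pyGetD ln i ' ')

theorem digA_eq_isdigit (ln : List Char) (i : Int) (h : 0 ≤ i) :
    PySem.Chars.isdigit (PySem.List.pyGetD ln i ' ') = digA ln i := by
  by_cases hL : i < (ln.length : Int)
  · simp [digA, h, hL]
  · have hn : PySem.List.pyGet? ln i = none := by
      rw [PySem.List.pyGet?_eq_none_iff]
      intro hr
      rcases hr with ⟨_, h2⟩
      omega
    rw [PySem.List.pyGetD_of_none _ _ _ hn]
    simp [digA, h, hL]
    decide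

theorem digA_bounds {ln : List Char} {i : Int} (h : digA ln i = true) :
    0 ≤ i ∧ i < (ln.length : Int) := by
  simp only [digA, Bool.and_eq_true, decide_eq_true_eq] at h
  exact ⟨h.1.1, h.1.2⟩

-- str(n) for n ≥ 0: decimal digits, injective, comma-free --------------------

theorem pvDigitChar_isDigit {k : Nat} (hk : k < 10) : (Nat.digitChar k).isDigit = true := by
  interval_cases k <;> decide

theorem pvToDigits_no_comma (n : Nat) : ',' ∉ Nat.toDigits 10 n := by
  induction n using Nat.strong_induction_on with
  | _ n ih =>
    rw [Nat.toDigits_eq_if (by norm_num)]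
    split
    · rename_i hn
      simp only [List.mem_singleton]
      intro h
      have hd := pvDigitChar_isDigit hn
      rw [← h] at hd
      exact absurd hd (by decide)
    · rename_i hn
      intro hmem
      rcases List.mem_append.mp hmem with h | h
      · exact ih (n / 10) (by omega) h
      · simp only [List.mem_singleton] at h
        have hd := pvDigitChar_isDigit (Nat.mod_lt n (by norm_num))
        rw [← h] at hd
        exact absurd hd (by decide)

theorem pvToDigits_ne_nil (n : Nat) : Nat.toDigits 10 n ≠ [] := by
  rw [Nat.toDigits_eq_if (by norm_num)]
  split <;> simp

theorem pvDigitChar_inj {a b : Nat} (ha : a < 10) (hb : b < 10)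
    (h : Nat.digitChar a = Nat.digitChar b) : a = b := by
  revert h
  interval_cases a <;> interval_cases b <;> decide

theorem pvToDigits_inj (n : Nat) : ∀ m : Nat, Nat.toDigits 10 n = Nat.toDigits 10 m → n = m := by
  induction n using Nat.strong_induction_on with
  | _ n ih =>
    intro m h
    rw [Nat.toDigits_eq_if (n := n) (by norm_num), Nat.toDigits_eq_if (n := m) (by norm_num)] at h
    by_cases hn : n < 10 <;> by_cases hm : m < 10
    · rw [if_pos hn, if_pos hm] at h
      simp only [List.cons.injEq] at h
      exact pvDigitChar_inj hn hm h.1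
    · exfalso
      rw [if_pos hn, if_neg hm] at h
      have hlen := congrArg List.length h
      have h1 : 0 < (Nat.toDigits 10 (m / 10)).length :=
        List.length_pos_iff.mpr (pvToDigits_ne_nil _)
      simp only [List.length_cons, List.length_nil, List.length_append] at hlen
      omega
    · exfalso
      rw [if_neg hn, if_pos hm] at h
      have hlen := congrArg List.length h
      have h1 : 0 < (Nat.toDigits 10 (n / 10)).length :=
        List.length_pos_iff.mpr (pvToDigits_ne_nil _)
      simp only [List.length_cons, List.length_nil, List.length_append] at hlen
      omega
    · rw [if_neg hn, if_neg hm] at h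
      have hinj := List.append_inj' h (by simp)
      have h1 := ih (n / 10) (by omega) (m / 10) hinj.1
      have h2 : n % 10 = m % 10 := by
        apply pvDigitChar_inj (Nat.mod_lt n (by norm_num)) (Nat.mod_lt m (by norm_num))
        simpa using hinj.2
      omega

theorem pvToChars_nonneg {n : Int} (h : 0 ≤ n) :
    PySem.Int.toChars n = Nat.toDigits 10 n.toNat := by
  simp [PySem.Int.toChars, show ¬ n < 0 by omega]

theorem pvCommaSplit : ∀ (a c b d : List Char), ',' ∉ a → ',' ∉ c →
    a ++ ',' :: b = c ++ ',' :: d → a = c ∧ b = d := by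
  intro a
  induction a with
  | nil =>
    intro c b d _ hc h
    cases c with
    | nil => simpa using h
    | cons ch ct =>
      simp only [List.nil_append, List.cons_append, List.cons.injEq] at h
      exact absurd (h.1 ▸ List.mem_cons_self ..) hc
  | cons ah at' ih =>
    intro c b d ha hc h
    cases c with
    | nil =>
      simp only [List.nil_append, List.cons_append, List.cons.injEq] at h
      exact absurd (h.1 ▸ List.mem_cons_self ..) ha
    | cons ch ct =>
      simp only [List.cons_append, List.cons.injEq] at h
      obtain ⟨rfl, h2⟩ := h
      obtain ⟨h3, h4⟩ := ih ct b d (fun hm => ha (List.mem_cons_of_mem _ hm))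
        (fun hm => hc (List.mem_cons_of_mem _ hm)) h2
      exact ⟨by rw [h3], h4⟩

theorem pvKeyA_inj {i j u v : Int} (hi : 0 ≤ i) (hj : 0 ≤ j) (hu : 0 ≤ u) (hv : 0 ≤ v)
    (h : pvKeyA i u = pvKeyA j v) : i = j ∧ u = v := by
  unfold pvKeyA at h
  rw [pvToChars_nonneg hi, pvToChars_nonneg hj, pvToChars_nonneg hu, pvToChars_nonneg hv] at h
  obtain ⟨h1, h2⟩ := pvCommaSplit _ _ _ _ (pvToDigits_no_comma _) (pvToDigits_no_comma _) h
  have e1 := pvToDigits_inj _ _ h1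
  have e2 := pvToDigits_inj _ _ h2
  omega

-- contiguous segments of a ln ----------------------------------------------

def seg (ln : List Char) (s e : Int) : List Char := (ln.drop s.toNat).take (e - s).toNat

theorem seg_empty (ln : List Char) {s e : Int} (h : e ≤ s) : seg ln s e = [] := by
  unfold seg
  rw [show (e - s).toNat = 0 by omega]
  simp

theorem seg_snoc (ln : List Char) {s x : Int} (hs : 0 ≤ s) (hsx : s ≤ x)
    (hx0 : 0 ≤ x) (hxL : x.toNat < ln.length) :
    seg ln s (x + 1) = seg ln s x ++ [ln[x.toNat]] := by
  unfold seg
  rw [show (x + 1 - s).toNat = (x - s).toNat + 1 by omega, List.take_add_one]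
  congr 1
  rw [List.getElem?_drop, show s.toNat + (x - s).toNat = x.toNat by omega,
    List.getElem?_eq_getElem (by omega)]
  rfl

theorem seg_cons (ln : List Char) {x e : Int} (hx : 0 ≤ x) (hxe : x < e)
    (hxL : x.toNat < ln.length) :
    seg ln x e = ln[x.toNat] :: seg ln (x + 1) e := by
  unfold seg
  rw [List.drop_eq_getElem_cons hxL,
    show (e - x).toNat = (e - (x + 1)).toNat + 1 by omega, List.take_succ_cons,
    show x.toNat + 1 = (x + 1).toNat by omega]

theorem seg_append (ln : List Char) {s m e : Int} (hs : 0 ≤ s) (hm : s ≤ m) (he : m ≤ e) :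
    seg ln s m ++ seg ln m e = seg ln s e := by
  unfold seg
  rw [show (e - s).toNat = (m - s).toNat + (e - m).toNat by omega, List.take_add]
  congr 1
  rw [List.drop_drop, show s.toNat + (m - s).toNat = m.toNat by omega]

-- the two while loops of A's get_num ----------------------------------------

theorem get_num_left_spec (ln : List Char) (y : Int) :
    ∀ (fuel : Nat) (x : Int) (res : PySem.Dict (List Char) Char) (r : List Char),
      (x + 1).toNat ≤ fuel →
      ∃ s : Int, s ≤ x + 1 ∧ digA ln (s - 1) = false ∧
        (∀ i, s ≤ i → i ≤ x → digA ln i = true) ∧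
        (get_num_left ln y fuel x res r).2 = seg ln s (x + 1) ++ r ∧
        (∀ k, (get_num_left ln y fuel x res r).1.contains k = true ↔
          ((∃ i, s ≤ i ∧ i ≤ x ∧ k = pvKeyA i y) ∨ res.contains k = true)) := by
  intro fuel
  induction fuel with
  | zero =>
    intro x res r hf
    refine ⟨x + 1, le_refl _, ?_, ?_, ?_, ?_⟩
    · unfold digA
      rw [decide_eq_false (show ¬ (0 : Int) ≤ x + 1 - 1 by omega)]
      simp
    · intro i h1 h2; omega
    · rw [get_num_left, seg_empty ln (le_refl _)]; rfl
    · intro k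
      rw [get_num_left]
      constructor
      · exact fun h => Or.inr h
      · rintro (⟨i, h1, h2, _⟩ | h)
        · omega
        · exact h
  | succ fuel ih =>
    intro x res r hf
    rw [get_num_left]
    by_cases hc : 0 ≤ x ∧ PySem.Chars.isdigit (PySem.List.pyGetD ln x ' ') = true
    · have hdA : digA ln x = true := by rw [← digA_eq_isdigit ln x hc.1]; exact hc.2
      have hxL : x < (ln.length : Int) := (digA_bounds hdA).2
      rw [if_pos hc]
      obtain ⟨s, hs1, hs2, hs3, hs4, hs5⟩ := ih (x - 1)
        (res.insert (pvKeyA x y) (PySem.List.pyGetD ln x ' '))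
        (PySem.List.pyGetD ln x ' ' :: r) (by omega)
      have hs0 : 0 ≤ s := by
        by_cases hsx : s ≤ x - 1
        · exact (digA_bounds (hs3 s (le_refl _) hsx)).1
        · omega
      refine ⟨s, by omega, hs2, ?_, ?_, ?_⟩
      · intro i h1 h2
        rcases eq_or_lt_of_le h2 with rfl | hlt
        · exact hdA
        · exact hs3 i h1 (by omega)
      · rw [hs4, show x - 1 + 1 = x by ring,
          PySem.List.pyGetD_eq_getElem ln ' ' hc.1 hxL,
          seg_snoc ln hs0 (by omega) hc.1 (by omega)]
        simp
      · intro k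
        rw [hs5 k, PySem.Dict.contains_insert]
        simp only [Bool.or_eq_true, beq_iff_eq]
        constructor
        · rintro (⟨i, h1, h2, h3⟩ | (h | h))
          · exact Or.inl ⟨i, h1, by omega, h3⟩
          · exact Or.inl ⟨x, by omega, le_refl _, h⟩
          · exact Or.inr h
        · rintro (⟨i, h1, h2, h3⟩ | h)
          · rcases eq_or_lt_of_le h2 with rfl | hlt
            · exact Or.inr (Or.inl h3)
            · exact Or.inl ⟨i, h1, by omega, h3⟩
          · exact Or.inr (Or.inr h)
    · rw [if_neg hc]
      refine ⟨x + 1, le_refl _, ?_, ?_, ?_, ?_⟩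
      · simp only [add_sub_cancel_right]
        by_cases hx : 0 ≤ x
        · rw [← digA_eq_isdigit ln x hx]
          by_contra hne
          exact hc ⟨hx, by simpa using hne⟩
        · simp [digA, hx]
      · intro i h1 h2; omega
      · rw [seg_empty ln (le_refl _)]; rfl
      · intro k
        constructor
        · exact fun h => Or.inr h
        · rintro (⟨i, h1, h2, _⟩ | h)
          · omega
          · exact h

theorem get_num_right_spec (ln : List Char) (y : Int) :
    ∀ (fuel : Nat) (x : Int) (res : PySem.Dict (List Char) Char) (r : List Char),
      0 ≤ x → ((ln.length : Int) - x).toNat ≤ fuel →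
      ∃ e : Int, x ≤ e ∧ digA ln e = false ∧
        (∀ i, x ≤ i → i < e → digA ln i = true) ∧
        (get_num_right ln y fuel x res r).2 = r ++ seg ln x e ∧
        (∀ k, (get_num_right ln y fuel x res r).1.contains k = true ↔
          ((∃ i, x ≤ i ∧ i < e ∧ k = pvKeyA i y) ∨ res.contains k = true)) := by
  intro fuel
  induction fuel with
  | zero =>
    intro x res r hx hf
    refine ⟨x, le_refl _, ?_, ?_, ?_, ?_⟩
    · have : ¬ x < (ln.length : Int) := by omega
      simp [digA, this]
    · intro i h1 h2; omega
    · rw [get_num_right, seg_empty ln (le_refl _)]; simp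
    · intro k
      rw [get_num_right]
      constructor
      · exact fun h => Or.inr h
      · rintro (⟨i, h1, h2, _⟩ | h)
        · omega
        · exact h
  | succ fuel ih =>
    intro x res r hx hf
    rw [get_num_right]
    by_cases hc : x < (ln.length : Int) ∧ PySem.Chars.isdigit (PySem.List.pyGetD ln x ' ') = true
    · have hdA : digA ln x = true := by rw [← digA_eq_isdigit ln x hx]; exact hc.2
      rw [if_pos hc]
      obtain ⟨e, he1, he2, he3, he4, he5⟩ := ih (x + 1)
        (res.insert (pvKeyA x y) (PySem.List.pyGetD ln x ' '))
        (r ++ [PySem.List.pyGetD ln x ' ']) (by omega) (by omega)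
      refine ⟨e, by omega, he2, ?_, ?_, ?_⟩
      · intro i h1 h2
        rcases eq_or_lt_of_le h1 with rfl | hlt
        · exact hdA
        · exact he3 i (by omega) h2
      · rw [he4, PySem.List.pyGetD_eq_getElem ln ' ' hx hc.1,
          seg_cons ln hx (by omega) (by omega)]
        simp
      · intro k
        rw [he5 k, PySem.Dict.contains_insert]
        simp only [Bool.or_eq_true, beq_iff_eq]
        constructor
        · rintro (⟨i, h1, h2, h3⟩ | (h | h))
          · exact Or.inl ⟨i, by omega, h2, h3⟩
          · exact Or.inl ⟨x, le_refl _, by omega, h⟩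
          · exact Or.inr h
        · rintro (⟨i, h1, h2, h3⟩ | h)
          · rcases eq_or_lt_of_le h1 with rfl | hlt
            · exact Or.inr (Or.inl h3)
            · exact Or.inl ⟨i, by omega, h2, h3⟩
          · exact Or.inr (Or.inr h)
    · rw [if_neg hc]
      refine ⟨x, le_refl _, ?_, ?_, ?_, ?_⟩
      · by_cases hxL : x < (ln.length : Int)
        · rw [← digA_eq_isdigit ln x hx]
          by_contra hne
          exact hc ⟨hxL, by simpa using hne⟩
        · simp [digA, hxL]
      · intro i h1 h2; omega
      · rw [seg_empty ln (le_refl _)]; simp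
      · intro k
        constructor
        · exact fun h => Or.inr h
        · rintro (⟨i, h1, h2, _⟩ | h)
          · omega
          · exact h

theorem get_num_spec (ln : List Char) (x y : Int) (hx : 0 ≤ x) (hd : digA ln x = true) :
    ∃ s e : Int, 0 ≤ s ∧ s ≤ x ∧ x < e ∧
      (∀ i, s ≤ i → i < e → digA ln i = true) ∧
      digA ln (s - 1) = false ∧ digA ln e = false ∧
      (get_num ln x y).2 = seg ln s e ∧
      (∀ k, (get_num ln x y).1.contains k = true ↔ ∃ i, s ≤ i ∧ i < e ∧ k = pvKeyA i y) := by
  obtain ⟨s, hs1, hs2, hs3, hs4, hs5⟩ :=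
    get_num_left_spec ln y (x + 1).toNat x PySem.Dict.empty [] (le_refl _)
  obtain ⟨e, he1, he2, he3, he4, he5⟩ :=
    get_num_right_spec ln y ((ln.length : Int) - (x + 1)).toNat (x + 1)
      (get_num_left ln y (x + 1).toNat x PySem.Dict.empty []).1
      (get_num_left ln y (x + 1).toNat x PySem.Dict.empty []).2 (by omega) (le_refl _)
  have hsx : s ≤ x := by
    rcases eq_or_lt_of_le hs1 with heq | hlt
    · exfalso
      rw [show s - 1 = x by omega] at hs2
      rw [hd] at hs2
      simp at hs2
    · omega
  have hs0 : 0 ≤ s := (digA_bounds (hs3 s (le_refl _) hsx)).1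
  refine ⟨s, e, hs0, hsx, by omega, ?_, hs2, he2, ?_, ?_⟩
  · intro i h1 h2
    by_cases hix : i ≤ x
    · exact hs3 i h1 hix
    · exact he3 i (by omega) h2
  · show (get_num_right ln y ((ln.length : Int) - (x + 1)).toNat (x + 1)
      (get_num_left ln y (x + 1).toNat x PySem.Dict.empty []).1
      (get_num_left ln y (x + 1).toNat x PySem.Dict.empty []).2).2 = seg ln s e
    rw [he4, hs4, List.append_nil, seg_append ln hs0 (by omega) (by omega)]
  · intro k
    show (get_num_right ln y ((ln.length : Int) - (x + 1)).toNat (x + 1)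
      (get_num_left ln y (x + 1).toNat x PySem.Dict.empty []).1
      (get_num_left ln y (x + 1).toNat x PySem.Dict.empty []).2).1.contains k = true ↔ _
    rw [he5 k, hs5 k]
    simp only [PySem.Dict.contains_empty, Bool.false_eq_true, or_false]
    constructor
    · rintro (⟨i, h1, h2, h3⟩ | ⟨i, h1, h2, h3⟩)
      · exact ⟨i, by omega, h2, h3⟩
      · exact ⟨i, h1, by omega, h3⟩
    · rintro ⟨i, h1, h2, h3⟩
      by_cases hix : i ≤ x
      · exact Or.inr ⟨i, h1, hix, h3⟩
      · exact Or.inl ⟨i, by omega, h2, h3⟩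

-- B's scanners ---------------------------------------------------------------

theorem pvScanLeft_spec (ln : List Char) :
    ∀ (fuel : Nat) (sx : Int), 0 ≤ sx → sx.toNat ≤ fuel →
      0 ≤ pvScanLeft ln fuel sx ∧ pvScanLeft ln fuel sx ≤ sx ∧
      digA ln (pvScanLeft ln fuel sx - 1) = false ∧
      (∀ i, pvScanLeft ln fuel sx ≤ i → i < sx → digA ln i = true) := by
  intro fuel
  induction fuel with
  | zero =>
    intro sx h0 hf
    have hsx : sx = 0 := by omega
    subst hsx
    rw [pvScanLeft]
    refine ⟨le_refl _, le_refl _, ?_, ?_⟩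
    · simp [digA]
    · intro i h1 h2; omega
  | succ fuel ih =>
    intro sx h0 hf
    rw [pvScanLeft]
    by_cases hc : 0 < sx ∧ PySem.Chars.isdigit (PySem.List.pyGetD ln (sx - 1) ' ') = true
    · have hdA : digA ln (sx - 1) = true := by
        rw [← digA_eq_isdigit ln (sx - 1) (by omega)]; exact hc.2
      rw [if_pos hc]
      obtain ⟨h1, h2, h3, h4⟩ := ih (sx - 1) (by omega) (by omega)
      refine ⟨h1, by omega, h3, ?_⟩
      intro i hi1 hi2
      rcases eq_or_lt_of_le (show i ≤ sx - 1 by omega) with rfl | hlt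
      · exact hdA
      · exact h4 i hi1 (by omega)
    · rw [if_neg hc]
      refine ⟨h0, le_refl _, ?_, ?_⟩
      · by_cases hp : 0 < sx
        · rw [← digA_eq_isdigit ln (sx - 1) (by omega)]
          by_contra hne
          exact hc ⟨hp, by simpa using hne⟩
        · have hz : sx = 0 := by omega
          rw [hz]
          simp [digA]
      · intro i h1 h2; omega

theorem pvScanRight_spec (ln : List Char) :
    ∀ (fuel : Nat) (ex : Int), 0 ≤ ex → ((ln.length : Int) - ex).toNat ≤ fuel →
      ex ≤ pvScanRight ln fuel ex ∧
      digA ln (pvScanRight ln fuel ex) = false ∧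
      (∀ i, ex ≤ i → i < pvScanRight ln fuel ex → digA ln i = true) := by
  intro fuel
  induction fuel with
  | zero =>
    intro ex h0 hf
    rw [pvScanRight]
    refine ⟨le_refl _, ?_, ?_⟩
    · have : ¬ ex < (ln.length : Int) := by omega
      simp [digA, this]
    · intro i h1 h2; omega
  | succ fuel ih =>
    intro ex h0 hf
    rw [pvScanRight]
    by_cases hc : ex < (ln.length : Int) ∧ PySem.Chars.isdigit (PySem.List.pyGetD ln ex ' ') = true
    · have hdA : digA ln ex = true := by
        rw [← digA_eq_isdigit ln ex h0]; exact hc.2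
      rw [if_pos hc]
      obtain ⟨h1, h2, h3⟩ := ih (ex + 1) (by omega) (by omega)
      refine ⟨by omega, h2, ?_⟩
      intro i hi1 hi2
      rcases eq_or_lt_of_le hi1 with rfl | hlt
      · exact hdA
      · exact h3 i (by omega) hi2
    · rw [if_neg hc]
      refine ⟨le_refl _, ?_, ?_⟩
      · by_cases hxL : ex < (ln.length : Int)
        · rw [← digA_eq_isdigit ln ex h0]
          by_contra hne
          exact hc ⟨hxL, by simpa using hne⟩
        · simp [digA, hxL]
      · intro i h1 h2; omega

-- maximal runs are unique ----------------------------------------------------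

theorem run_eq {ln : List Char} {s1 e1 s2 e2 : Int}
    (d1 : ∀ i, s1 ≤ i → i < e1 → digA ln i = true)
    (b1l : digA ln (s1 - 1) = false) (b1r : digA ln e1 = false)
    (d2 : ∀ i, s2 ≤ i → i < e2 → digA ln i = true)
    (b2l : digA ln (s2 - 1) = false) (b2r : digA ln e2 = false)
    (hx : ∃ i, s1 ≤ i ∧ i < e1 ∧ s2 ≤ i ∧ i < e2) : s1 = s2 ∧ e1 = e2 := by
  obtain ⟨i, h1, h2, h3, h4⟩ := hx
  constructor
  · rcases lt_trichotomy s1 s2 with hlt | heq | hgt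
    · exfalso
      have := d1 (s2 - 1) (by omega) (by omega)
      rw [this] at b2l
      simp at b2l
    · exact heq
    · exfalso
      have := d2 (s1 - 1) (by omega) (by omega)
      rw [this] at b1l
      simp at b1l
  · rcases lt_trichotomy e1 e2 with hlt | heq | hgt
    · exfalso
      have := d2 e1 (by omega) hlt
      rw [this] at b1r
      simp at b1r
    · exact heq
    · exfalso
      have := d1 e2 (by omega) hgt
      rw [this] at b2r
      simp at b2r

-- what one entry of A's nums list is -----------------------------------------

def NumRep (ln : List Char) (y s e : Int) (num : PySem.Dict (List Char) Char × List Char) : Prop :=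
  0 ≤ s ∧ s < e ∧ (∀ i, s ≤ i → i < e → digA ln i = true) ∧
  digA ln (s - 1) = false ∧ digA ln e = false ∧
  num.2 = seg ln s e ∧
  (∀ k, num.1.contains k = true ↔ ∃ i, s ≤ i ∧ i < e ∧ k = pvKeyA i y)

theorem overlap_iff {line1 line2 : List Char} {y1 y2 s1 e1 s2 e2 : Int}
    {n1 n2 : PySem.Dict (List Char) Char × List Char}
    (h1 : NumRep line1 y1 s1 e1 n1) (h2 : NumRep line2 y2 s2 e2 n2)
    (hy1 : 0 ≤ y1) (hy2 : 0 ≤ y2) :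
    overlap n1.1 n2.1 = true ↔ (y1 = y2 ∧ ∃ i, s1 ≤ i ∧ i < e1 ∧ s2 ≤ i ∧ i < e2) := by
  obtain ⟨hs10, _, _, _, _, _, hk1⟩ := h1
  obtain ⟨hs20, _, _, _, _, _, hk2⟩ := h2
  unfold overlap
  simp only [Bool.or_eq_true, List.any_eq_true]
  constructor
  · rintro (⟨k, hk, hc⟩ | ⟨k, hk, hc⟩)
    · have hc1 : n1.1.contains k = true := (PySem.Dict.contains_iff_mem_keys _ _).mpr hk
      obtain ⟨i, hi1, hi2, rfl⟩ := (hk1 k).mp hc1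
      obtain ⟨j, hj1, hj2, hkey⟩ := (hk2 _).mp hc
      obtain ⟨hij, hyy⟩ := pvKeyA_inj (by omega) (by omega) hy1 hy2 hkey
      exact ⟨hyy, i, hi1, hi2, by omega, by omega⟩
    · have hc2 : n2.1.contains k = true := (PySem.Dict.contains_iff_mem_keys _ _).mpr hk
      obtain ⟨i, hi1, hi2, rfl⟩ := (hk2 k).mp hc2
      obtain ⟨j, hj1, hj2, hkey⟩ := (hk1 _).mp hc
      obtain ⟨hij, hyy⟩ := pvKeyA_inj (by omega) (by omega) hy2 hy1 hkey
      exact ⟨hyy.symm, i, by omega, by omega, hi1, hi2⟩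
  · rintro ⟨hyeq, i, hi1, hi2, hi3, hi4⟩
    left
    refine ⟨pvKeyA i y1, (PySem.Dict.contains_iff_mem_keys _ _).mp ((hk1 _).mpr ⟨i, hi1, hi2, rfl⟩), ?_⟩
    exact (hk2 _).mpr ⟨i, hi3, hi4, by rw [hyeq]⟩

-- the simulation relation between the two loop states ------------------------

def rowOf (mat : List String) (yy : Int) : List Char := (PySem.List.pyGetD mat yy "").toList

def Good (mat : List String) (t : Int × Int × Int) (num : PySem.Dict (List Char) Char × List Char) : Prop :=
  0 ≤ t.2.2 ∧ t.2.2 < (mat.length : Int) ∧ NumRep (rowOf mat t.2.2) t.2.2 t.1 t.2.1 num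

def RelState (mat : List String) (nums : List (PySem.Dict (List Char) Char × List Char))
    (st : PySem.Set (Int × Int) × List Int) : Prop :=
  ∃ L : List (Int × Int × Int),
    st.1 = L.map (fun t => (t.1, t.2.2)) ∧
    (L.map (fun t => (t.1, t.2.2))).Nodup ∧
    st.2 = L.map (fun t => (PySem.Int.ofChars? (seg (rowOf mat t.2.2) t.1 t.2.1)).getD 0) ∧
    List.Forall₂ (Good mat) L nums

-- named copies of the loop bodies of the two ports (definitionally equal to them)

def AInner (x oy yy : Int) (ln : List Char) :
    List (PySem.Dict (List Char) Char × List Char) → Int → List (PySem.Dict (List Char) Char × List Char) :=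
  fun nums ox =>
    if ox = 0 ∧ oy = 0 then nums
    else
      let xx := x + ox
      if xx < 0 ∨ (ln.length : Int) ≤ xx then nums
      else
        let val := PySem.List.pyGetD ln xx ' '
        if PySem.Chars.isdigit val = true then
          let num := get_num ln xx yy
          let overlaps := nums.foldl
            (fun ov existing => if !ov then overlap existing.1 num.1 else ov) false
          if overlaps then nums else nums ++ [num]
        else nums

def AOuter (mat : List String) (x y : Int) :
    List (PySem.Dict (List Char) Char × List Char) → Int → List (PySem.Dict (List Char) Char × List Char) :=
  fun nums oy =>
    let yy := y + oy
    if yy < 0 ∨ (mat.length : Int) ≤ yy then nums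
    else ([-1, 0, 1] : List Int).foldl (AInner x oy yy ((PySem.List.pyGetD mat yy "").toList)) nums

theorem A_eq (mat : List String) (x y : Int) :
    get_adj_nums mat x y =
      (([-1, 0, 1] : List Int).foldl (AOuter mat x y) []).map
        (fun n => (PySem.Int.ofChars? n.2).getD 0) := rfl

def BInner (x oy yy : Int) (ln : List Char) :
    PySem.Set (Int × Int) × List Int → Int → PySem.Set (Int × Int) × List Int :=
  fun st ox =>
    if ox = 0 ∧ oy = 0 then st
    else
      let xx := x + ox
      if xx < 0 ∨ (ln.length : Int) ≤ xx then st
      else if PySem.Chars.isdigit (PySem.List.pyGetD ln xx ' ') = true then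
        let sx := pvScanLeft ln xx.toNat xx
        if PySem.Set.contains st.1 (sx, yy) then st
        else
          let ex := pvScanRight ln (ln.length - sx.toNat) sx
          (PySem.Set.add st.1 (sx, yy),
           st.2 ++ [(PySem.Int.ofChars? (PySem.List.slice ln (some sx) (some ex))).getD 0])
      else st

def BOuter (mat : List String) (x y : Int) :
    PySem.Set (Int × Int) × List Int → Int → PySem.Set (Int × Int) × List Int :=
  fun st oy =>
    let yy := y + oy
    if yy < 0 ∨ (mat.length : Int) ≤ yy then st
    else ([-1, 0, 1] : List Int).foldl (BInner x oy yy ((PySem.List.pyGetD mat yy "").toList)) st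

theorem B_eq (mat : List String) (x y : Int) :
    get_adj_nums_alt mat x y =
      (([-1, 0, 1] : List Int).foldl (BOuter mat x y) ((PySem.Set.empty : PySem.Set (Int × Int)), ([] : List Int))).2 := rfl

-- one numeric candidate cell: both ports accept/reject it the same way -------

theorem pvCellStep (mat : List String) (yy : Int) (hy0 : 0 ≤ yy) (hyL : yy < (mat.length : Int))
    (xx : Int) (hx0 : 0 ≤ xx) (hxL : xx < ((rowOf mat yy).length : Int))
    (hd : PySem.Chars.isdigit (PySem.List.pyGetD (rowOf mat yy) xx ' ') = true)
    {nums : List (PySem.Dict (List Char) Char × List Char)} {st : PySem.Set (Int × Int) × List Int}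
    (h : RelState mat nums st) :
    RelState mat
      (if nums.foldl (fun ov existing => if !ov then overlap existing.1 (get_num (rowOf mat yy) xx yy).1 else ov) false
       then nums else nums ++ [get_num (rowOf mat yy) xx yy])
      (if PySem.Set.contains st.1 (pvScanLeft (rowOf mat yy) xx.toNat xx, yy) then st
       else
         (PySem.Set.add st.1 (pvScanLeft (rowOf mat yy) xx.toNat xx, yy),
          st.2 ++ [(PySem.Int.ofChars? (PySem.List.slice (rowOf mat yy) (some (pvScanLeft (rowOf mat yy) xx.toNat xx))
            (some (pvScanRight (rowOf mat yy) ((rowOf mat yy).length - (pvScanLeft (rowOf mat yy) xx.toNat xx).toNat)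
              (pvScanLeft (rowOf mat yy) xx.toNat xx))))).getD 0])) := by
  set ln := rowOf mat yy with hline
  have hdA : digA ln xx = true := by rw [← digA_eq_isdigit ln xx hx0]; exact hd
  obtain ⟨s, e, hs0, hsx, hxe, hrun, hbl, hbr, hval, hkeys⟩ := get_num_spec ln xx yy hx0 hdA
  obtain ⟨hsl0, hslle, hslb, hsldig⟩ := pvScanLeft_spec ln xx.toNat xx hx0 (le_refl _)
  set sx := pvScanLeft ln xx.toNat xx with hsxdef
  obtain ⟨hsrge, hsrb, hsrdig⟩ :=
    pvScanRight_spec ln (ln.length - sx.toNat) sx hsl0 (by omega)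
  set ex := pvScanRight ln (ln.length - sx.toNat) sx with hexdef
  have hxxex : xx < ex := by
    by_contra hle
    rw [not_lt] at hle
    have hdex : digA ln ex = true := by
      rcases eq_or_lt_of_le hle with heq | hlt
      · rw [heq]; exact hdA
      · exact hsldig ex hsrge hlt
    rw [hdex] at hsrb
    simp at hsrb
  obtain ⟨hse1, hse2⟩ := run_eq hrun hbl hbr hsrdig hslb hsrb ⟨xx, hsx, hxe, hslle, hxxex⟩
  have hnum : NumRep ln yy s e (get_num ln xx yy) :=
    ⟨hs0, by omega, hrun, hbl, hbr, hval, hkeys⟩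
  obtain ⟨L, hst1, hnd, hst2, hf2⟩ := h
  have hov : (nums.foldl (fun ov existing => if !ov then overlap existing.1 (get_num ln xx yy).1 else ov) false)
      = PySem.Set.contains st.1 (sx, yy) := by
    rw [pvFoldlOr]
    simp only [Bool.false_or]
    rw [Bool.eq_iff_iff, List.any_eq_true, PySem.Set.contains_iff]
    constructor
    · rintro ⟨n', hn', hovl⟩
      obtain ⟨t, htL, ht0, htLm, hNR⟩ := pvForall₂_exists_right hf2 n' hn'
      obtain ⟨hyeq, i, hi1, hi2, hi3, hi4⟩ := (overlap_iff hNR hnum ht0 hy0).mp hovl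
      have hlineq : rowOf mat t.2.2 = ln := by rw [hyeq]
      rw [hlineq] at hNR
      obtain ⟨_, _, htd, htbl, htbr, _, _⟩ := hNR
      obtain ⟨hts, _⟩ := run_eq htd htbl htbr hrun hbl hbr ⟨i, hi1, hi2, hi3, hi4⟩
      rw [hst1]
      have hkeyeq : (t.1, t.2.2) = (sx, yy) := by rw [hts, hyeq, hse1]
      rw [← hkeyeq]
      exact List.mem_map_of_mem htL
    · intro hmem
      rw [hst1] at hmem
      obtain ⟨t, htL, hkey⟩ := List.mem_map.mp hmem
      obtain ⟨n', hn', ht0, htLm, hNR⟩ := pvForall₂_exists_left hf2 t htL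
      refine ⟨n', hn', ?_⟩
      have ht1 : t.1 = sx := congrArg Prod.fst hkey
      have ht2 : t.2.2 = yy := by
        have := congrArg Prod.snd hkey
        simpa using this
      rw [(overlap_iff hNR hnum ht0 hy0)]
      obtain ⟨_, htlt, _, _, _, _, _⟩ := hNR
      exact ⟨ht2, t.1, le_refl _, htlt, by omega, by omega⟩
  rw [hov]
  by_cases hmem : PySem.Set.contains st.1 (sx, yy) = true
  · simp only [hmem, if_true]
    exact ⟨L, hst1, hnd, hst2, hf2⟩
  · have hmem' : PySem.Set.contains st.1 (sx, yy) = false := by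
      revert hmem; cases PySem.Set.contains st.1 (sx, yy) <;> simp
    simp only [hmem', if_false, Bool.false_eq_true]
    have hnotmem : (sx, yy) ∉ st.1 := fun hmm =>
      hmem ((PySem.Set.contains_iff _ _).mpr hmm)
    have hslice : PySem.List.slice ln (some sx) (some ex) = seg ln sx ex := by
      rw [PySem.List.slice_toNat ln hsl0 (by omega)]
      unfold seg
      congr 1
      omega
    have hnum' : NumRep ln yy sx ex (get_num ln xx yy) := by
      rw [← hse1, ← hse2]
      exact hnum
    refine ⟨L ++ [(sx, ex, yy)], ?_, ?_, ?_, ?_⟩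
    · rw [PySem.Set.add_of_not_mem hnotmem, hst1, List.map_append]
      rfl
    · rw [List.map_append, List.nodup_append]
      refine ⟨hnd, by simp, ?_⟩
      intro p hp q hq
      rw [show List.map (fun t => (t.1, t.2.2)) [((sx, ex, yy) : Int × Int × Int)] = [(sx, yy)] from rfl,
        List.mem_singleton] at hq
      subst hq
      intro hpq
      subst hpq
      rw [← hst1] at hp
      exact hnotmem hp
    · rw [hst2, List.map_append]
      simp only [List.map_cons, List.map_nil]
      rw [hslice]
    · exact pvForall₂_append_singleton hf2 ⟨hy0, hyL, hnum'⟩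

-- one inner-loop iteration preserves the relation ----------------------------

theorem pvInnerStep (mat : List String) (x oy yy : Int)
    (hy0 : 0 ≤ yy) (hyL : yy < (mat.length : Int)) (ox : Int)
    {nums : List (PySem.Dict (List Char) Char × List Char)} {st : PySem.Set (Int × Int) × List Int}
    (h : RelState mat nums st) :
    RelState mat (AInner x oy yy (rowOf mat yy) nums ox) (BInner x oy yy (rowOf mat yy) st ox) := by
  unfold AInner BInner
  by_cases h00 : ox = 0 ∧ oy = 0
  · rw [if_pos h00, if_pos h00]; exact h
  · rw [if_neg h00, if_neg h00]
    by_cases hxb : x + ox < 0 ∨ ((rowOf mat yy).length : Int) ≤ x + ox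
    · rw [if_pos hxb, if_pos hxb]; exact h
    · rw [if_neg hxb, if_neg hxb]
      rw [not_or, not_lt, not_le] at hxb
      by_cases hdig : PySem.Chars.isdigit (PySem.List.pyGetD (rowOf mat yy) (x + ox) ' ') = true
      · rw [if_pos hdig, if_pos hdig]
        exact pvCellStep mat yy hy0 hyL (x + ox) hxb.1 hxb.2 hdig h
      · rw [if_neg hdig, if_neg hdig]; exact h

theorem pvOuterStep (mat : List String) (x y : Int) (oy : Int)
    {nums : List (PySem.Dict (List Char) Char × List Char)} {st : PySem.Set (Int × Int) × List Int}
    (h : RelState mat nums st) :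
    RelState mat (AOuter mat x y nums oy) (BOuter mat x y st oy) := by
  unfold AOuter BOuter
  by_cases hyb : y + oy < 0 ∨ (mat.length : Int) ≤ y + oy
  · rw [if_pos hyb, if_pos hyb]; exact h
  · rw [if_neg hyb, if_neg hyb]
    rw [not_or, not_lt, not_le] at hyb
    exact pvFoldlRel (RelState mat) _ _ ([-1, 0, 1] : List Int)
      (fun nums st ox _ hr => pvInnerStep mat x oy (y + oy) hyb.1 hyb.2 ox hr) nums st h

-- ===== VERDICT (by name: the statement is the Claim_ definition above) =====
theorem get_adj_nums_spec : Claim_equal_get_adj_nums := by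
  intro mat x y _hdom
  unfold Spec_get_adj_nums
  rw [A_eq, B_eq]
  have hR : RelState mat (([-1, 0, 1] : List Int).foldl (AOuter mat x y) [])
      (([-1, 0, 1] : List Int).foldl (BOuter mat x y)
        ((PySem.Set.empty : PySem.Set (Int × Int)), ([] : List Int))) := by
    refine pvFoldlRel (RelState mat) _ _ ([-1, 0, 1] : List Int)
      (fun nums st oy _ hr => pvOuterStep mat x y oy hr) _ _ ?_
    exact ⟨[], rfl, List.nodup_nil, rfl, List.Forall₂.nil⟩
  obtain ⟨L, h1, h2, h3, h4⟩ := hR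
  rw [h3]
  refine (pvForall₂_map_eq _ _ h4 (fun t num hg => ?_)).symm
  obtain ⟨h01, hlen, hNR⟩ := hg
  obtain ⟨_, _, _, _, _, hv, _⟩ := hNR
  rw [hv]
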